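-- pv_equiv track=rewrite | github.com/adp46710810-hash/PythonChatBot | bot.py | _diff_world_boss_recent_logs
-- ===== SOURCE A (Python) =====
-- from typing import Any, Awaitable, Dict, List, Optional, Tuple
--
-- def _diff_world_boss_recent_logs(
--
--     previous_logs: List[str],
--     current_logs: List[str],
-- ) -> List[str]:
--     safe_previous = [str(line).strip() for line in previous_logs if str(line).strip()]
--     safe_current = [str(line).strip() for line in current_logs if str(line).strip()]
--     if not safe_current:
--         return []
--     if not safe_previous:
--         return list(safe_current)
--
--     overlap = 0
--     max_overlap = min(len(safe_previous), len(safe_current))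
--     for size in range(max_overlap, 0, -1):
--         if safe_previous[-size:] == safe_current[:size]:
--             overlap = size
--             break
--     return safe_current[overlap:]
-- ===== SOURCE B (Python) =====
-- from typing import List
--
--
-- def _diff_world_boss_recent_logs(
--     previous_logs: List[str],
--     current_logs: List[str],
-- ) -> List[str]:
--     safe_previous = [str(line).strip() for line in previous_logs if str(line).strip()]
--     safe_current = [str(line).strip() for line in current_logs if str(line).strip()]
--     if not safe_current:
--         return []
--     if not safe_previous:
--         return list(safe_current)
--     # KMP failure function over current + [None] + previous; None never equals a
--     # log line, so the final value k is the largest overlap size, i.e. the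
--     # largest k with safe_previous[-k:] == safe_current[:k].  O(n) total.
--     s = safe_current + [None] + safe_previous
--     pi = [0] * len(s)
--     k = 0
--     for i in range(1, len(s)):
--         while k > 0 and s[i] != s[k]:
--             k = pi[k - 1]
--         if s[i] == s[k]:
--             k += 1
--         pi[i] = k
--     return safe_current[k:]
-- ===== Notes on version B (the rewrite author's own statement) =====
-- stated objective: faster
-- what changed: Replaced the descending scan over all overlap sizes with slice comparisons (quadratic) by a single KMP failure-function pass over current + [None] + previous whose final value is the largest suffix/prefix overlap.
import Mathlib
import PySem

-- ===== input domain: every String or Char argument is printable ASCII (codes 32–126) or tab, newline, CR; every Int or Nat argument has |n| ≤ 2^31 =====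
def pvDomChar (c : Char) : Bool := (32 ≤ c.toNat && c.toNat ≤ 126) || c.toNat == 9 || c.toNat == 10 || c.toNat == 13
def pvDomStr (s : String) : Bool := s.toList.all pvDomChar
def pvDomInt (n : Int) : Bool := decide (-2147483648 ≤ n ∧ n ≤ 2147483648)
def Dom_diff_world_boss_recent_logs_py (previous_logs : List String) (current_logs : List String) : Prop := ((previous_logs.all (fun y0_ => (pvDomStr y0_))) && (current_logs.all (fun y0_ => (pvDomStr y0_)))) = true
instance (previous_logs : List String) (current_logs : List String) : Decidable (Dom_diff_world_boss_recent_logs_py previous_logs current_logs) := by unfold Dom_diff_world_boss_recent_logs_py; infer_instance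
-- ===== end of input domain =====

-- B replaces A's quadratic descending scan over overlap sizes by one linear KMP
-- failure-function pass over current ++ [None] ++ previous (objective: faster).

-- ===== PORT A =====
-- shared preprocessing: [str(line).strip() for line in logs if str(line).strip()]
-- (identical line in A and B; str(x) on a str is the identity)
def pvSafe (logs : List String) : List String :=
  logs.foldr (fun line acc =>
    if PySem.Str.strip line = "" then acc else PySem.Str.strip line :: acc) []

-- the loop 'for size in range(max_overlap, 0, -1): if safe_previous[-size:] == safe_current[:size]: overlap = size; break'
-- ported as descending structural recursion on size; returns overlap (0 if no break)
def pvAScan (sp sc : List String) : Nat → Nat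
  | 0 => 0
  | size + 1 =>
    if PySem.List.slice sp (some (-((size + 1 : Nat) : Int))) none
        = PySem.List.slice sc none (some ((size + 1 : Nat) : Int))
    then size + 1
    else pvAScan sp sc size

def diff_world_boss_recent_logs_py (previous_logs : List String) (current_logs : List String) : List String :=
  let safe_previous := pvSafe previous_logs
  let safe_current := pvSafe current_logs
  if safe_current = [] then []
  else if safe_previous = [] then safe_current
  else
    let overlap := pvAScan safe_previous safe_current (min safe_previous.length safe_current.length)
    PySem.List.slice safe_current (some ((overlap : Nat) : Int)) none

-- ===== PORT B =====
-- the inner 'while k > 0 and s[i] != s[k]: k = pi[k - 1]' of Source B; fuel is the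
-- entry value of k, enough since pi[k-1] < k on every reachable state
def pvKmpWhile (s : List (Option String)) (pi : List Nat) (ci : Option (Option String)) :
    Nat → Nat → Nat
  | _, 0 => 0
  | 0, k + 1 => k + 1
  | fuel + 1, k + 1 =>
    if s[k + 1]? = ci then k + 1
    else pvKmpWhile s pi ci fuel (pi.getD k 0)

-- the 'for i in range(1, len(s))' loop of Source B; pi is grown by appending the
-- value written at index i (python preinitialises with zeros it never reads)
def pvKmpFold (s : List (Option String)) : Nat :=
  ((List.range' 1 (s.length - 1)).foldl
    (fun (st : List Nat × Nat) i =>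
      let k0 := pvKmpWhile s st.1 s[i]? st.2 st.2
      let k1 := if s[i]? = s[k0]? then k0 + 1 else k0
      (st.1 ++ [k1], k1))
    ([0], 0)).2

def diff_world_boss_recent_logs_py_alt (previous_logs : List String) (current_logs : List String) : List String :=
  let safe_previous := pvSafe previous_logs
  let safe_current := pvSafe current_logs
  if safe_current = [] then []
  else if safe_previous = [] then safe_current
  else
    let s := safe_current.map some ++ [none] ++ safe_previous.map some
    let k := pvKmpFold s
    safe_current.drop k

-- ===== PRECONDITION & SPEC =====
def Spec_diff_world_boss_recent_logs_py (previous_logs : List String) (current_logs : List String) (out : List String) : Prop := out = diff_world_boss_recent_logs_py_alt previous_logs current_logs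
instance (previous_logs : List String) (current_logs : List String) (out : List String) : Decidable (Spec_diff_world_boss_recent_logs_py previous_logs current_logs out) := by unfold Spec_diff_world_boss_recent_logs_py; infer_instance

-- ===== CLAIM (what is proved, stated in full; the proofs are below) =====
def Claim_equal_diff_world_boss_recent_logs_py : Prop := ∀ (previous_logs : List String) (current_logs : List String), Dom_diff_world_boss_recent_logs_py previous_logs current_logs → Spec_diff_world_boss_recent_logs_py previous_logs current_logs (diff_world_boss_recent_logs_py previous_logs current_logs)

-- ===== LEMMAS AND PROOFS =====

-- k is a (possibly improper) border of t
def IsB (t : List (Option String)) (k : Nat) : Prop :=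
  k ≤ t.length ∧ t.take k = t.drop (t.length - k)

-- k is the largest proper border of t
def IsMaxB (t : List (Option String)) (k : Nat) : Prop :=
  IsB t k ∧ k < t.length ∧ ∀ j, j < t.length → IsB t j → j ≤ k

theorem isB_zero (t : List (Option String)) : IsB t 0 := by
  constructor
  · omega
  · simp

theorem isB_pointwise (t : List (Option String)) (k : Nat) (hk : k ≤ t.length) :
    IsB t k ↔ ∀ j, j < k → t[j]? = t[t.length - k + j]? := by
  unfold IsB
  constructor
  · rintro ⟨-, h⟩ j hj
    have := congrArg (fun l => l[j]?) h
    simpa [List.getElem?_take, List.getElem?_drop, hj] using this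
  · intro h
    refine ⟨hk, List.ext_getElem? fun j => ?_⟩
    by_cases hj : j < k
    · simpa [List.getElem?_take, List.getElem?_drop, hj] using h j hj
    · rw [List.getElem?_eq_none (by simp; omega), List.getElem?_eq_none (by simp; omega)]

theorem isB_append (t : List (Option String)) (c : Option String) (k : Nat)
    (hk : k < t.length) :
    IsB (t ++ [c]) (k + 1) ↔ IsB t k ∧ t[k]? = some c := by
  have ht : t[k]? = some t[k] := List.getElem?_eq_getElem hk
  have h1 : (t ++ [c]).take (k + 1) = t.take k ++ [t[k]] := by
    rw [List.take_append_of_le_length (by omega), List.take_add_one, ht]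
    simp
  have h2 : (t ++ [c]).drop ((t ++ [c]).length - (k + 1)) = t.drop (t.length - k) ++ [c] := by
    have hl : (t ++ [c]).length - (k + 1) = t.length - k := by simp
    rw [hl, List.drop_append_of_le_length (by omega)]
  unfold IsB
  rw [h1, h2]
  constructor
  · rintro ⟨-, h⟩
    have := List.append_inj' h (by simp)
    refine ⟨⟨by omega, this.1⟩, ?_⟩
    rw [ht]
    simpa using this.2
  · rintro ⟨⟨-, hb⟩, he⟩
    have hc : t[k] = c := by rw [ht] at he; exact Option.some.inj he
    refine ⟨by simp; omega, ?_⟩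
    rw [hb, hc]

theorem isB_take_of_le (t : List (Option String)) (j k : Nat)
    (hj : IsB t j) (hk : IsB t k) (hjk : j ≤ k) : IsB (t.take k) j := by
  obtain ⟨hj1, hj2⟩ := hj
  obtain ⟨hk1, hk2⟩ := hk
  have hlen : (t.take k).length = k := by simp [Nat.min_eq_left hk1]
  refine ⟨by omega, ?_⟩
  rw [hlen, List.take_take, Nat.min_eq_left hjk, hk2, List.drop_drop]
  have : (t.length - k) + (k - j) = t.length - j := by omega
  rw [this, hj2]

theorem isB_of_take (t : List (Option String)) (j k : Nat)
    (hk : IsB t k) (hj : IsB (t.take k) j) : IsB t j := by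
  obtain ⟨hk1, hk2⟩ := hk
  obtain ⟨hj1, hj2⟩ := hj
  have hlen : (t.take k).length = k := by simp [Nat.min_eq_left hk1]
  rw [hlen] at hj1 hj2
  refine ⟨by omega, ?_⟩
  have h3 : t.take j = (t.take k).take j := by rw [List.take_take, Nat.min_eq_left hj1]
  rw [h3, hj2, hk2, List.drop_drop]
  have : (t.length - k) + (k - j) = t.length - j := by omega
  rw [this]

-- the while loop, started at a border k of s.take i with correct pi entries,
-- returns the largest border r ≤ k of s.take i with s[r] = s[i] (or 0)
theorem kmpWhile_spec (s : List (Option String)) (pi : List Nat) (i : Nat)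
    (hi1 : 1 ≤ i) (hi : i < s.length) (hpiLen : pi.length = i)
    (hpi : ∀ m, m < i → IsMaxB (s.take (m + 1)) (pi.getD m 0)) :
    ∀ fuel k, k ≤ fuel → IsB (s.take i) k → k < i →
      IsB (s.take i) (pvKmpWhile s pi s[i]? fuel k) ∧
      pvKmpWhile s pi s[i]? fuel k < i ∧
      (pvKmpWhile s pi s[i]? fuel k = 0 ∨
        s[pvKmpWhile s pi s[i]? fuel k]? = s[i]?) ∧
      (∀ j, j < i → IsB (s.take i) j → s[j]? = s[i]? → j ≤ k →
        j ≤ pvKmpWhile s pi s[i]? fuel k) := by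
  intro fuel
  induction fuel with
  | zero =>
    intro k hkf hb hki
    obtain rfl : k = 0 := by omega
    simp only [pvKmpWhile]
    exact ⟨isB_zero _, by omega, Or.inl trivial, fun j _ _ _ hj0 => by omega⟩
  | succ fuel ih =>
    intro k hkf hb hki
    cases k with
    | zero =>
      simp only [pvKmpWhile]
      exact ⟨isB_zero _, by omega, Or.inl trivial, fun j _ _ _ hj0 => by omega⟩
    | succ k =>
      by_cases hc : s[k + 1]? = s[i]?
      · simp only [pvKmpWhile, if_pos hc]
        exact ⟨hb, hki, Or.inr hc, fun j _ _ _ hj => hj⟩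
      · simp only [pvKmpWhile, if_neg hc]
        have hmk : IsMaxB (s.take (k + 1)) (pi.getD k 0) := hpi k (by omega)
        have hlen : (s.take (k + 1)).length = k + 1 := by simp; omega
        have hk2lt : pi.getD k 0 < k + 1 := by have := hmk.2.1; rw [hlen] at this; omega
        have htk : (s.take i).take (k + 1) = s.take (k + 1) := by
          rw [List.take_take]; congr 1; omega
        have hb2 : IsB (s.take i) (pi.getD k 0) := by
          apply isB_of_take (s.take i) (pi.getD k 0) (k + 1) hb
          rw [htk]; exact hmk.1
        obtain ⟨r1, r2, r3, r4⟩ := ih (pi.getD k 0) (by omega) hb2 (by omega)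
        refine ⟨r1, r2, r3, ?_⟩
        intro j hj hbj hsj hjk
        have hjne : j ≠ k + 1 := by rintro rfl; exact hc hsj
        have hjle : j ≤ k := by omega
        have hbj2 : IsB (s.take (k + 1)) j := by
          have := isB_take_of_le (s.take i) j (k + 1) hbj hb (by omega)
          rwa [htk] at this
        have hjk2 : j ≤ pi.getD k 0 := hmk.2.2 j (by rw [hlen]; omega) hbj2
        exact r4 j hj hbj hsj hjk2

-- one iteration of the for loop turns the max border of s.take i into the
-- max border of s.take (i+1)
theorem kmpStep_spec (s : List (Option String)) (pi : List Nat) (i k : Nat)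
    (hi1 : 1 ≤ i) (hi : i < s.length) (hpiLen : pi.length = i)
    (hpi : ∀ m, m < i → IsMaxB (s.take (m + 1)) (pi.getD m 0))
    (hk : IsMaxB (s.take i) k) :
    IsMaxB (s.take (i + 1))
      (if s[i]? = s[pvKmpWhile s pi s[i]? k k]? then pvKmpWhile s pi s[i]? k k + 1
       else pvKmpWhile s pi s[i]? k k) := by
  have hlen : (s.take i).length = i := by simp; omega
  obtain ⟨hb, hklt, hmax⟩ := hk
  rw [hlen] at hklt
  obtain ⟨r1, r2, r3, r4⟩ := kmpWhile_spec s pi i hi1 hi hpiLen hpi k k le_rfl hb hklt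
  set r := pvKmpWhile s pi s[i]? k k with hr
  have hsi : s[i]? = some s[i] := List.getElem?_eq_getElem hi
  have hstake : s.take (i + 1) = s.take i ++ [s[i]] := by
    rw [List.take_add_one, hsi]; simp
  have hlen1 : (s.take (i + 1)).length = i + 1 := by simp; omega
  by_cases hc : s[i]? = s[r]?
  · rw [if_pos hc]
    have htr : (s.take i)[r]? = some s[i] := by
      have h5 : (s.take i)[r]? = s[r]? := by simp [List.getElem?_take, r2]
      rw [h5, ← hc]; exact hsi
    refine ⟨?_, ?_, ?_⟩
    · rw [hstake]
      exact (isB_append (s.take i) (s[i]) r (by rw [hlen]; omega)).mpr ⟨r1, htr⟩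
    · rw [hlen1]; omega
    · intro j hj hbj
      rw [hlen1] at hj
      cases j with
      | zero => omega
      | succ j' =>
        rw [hstake] at hbj
        obtain ⟨hbj', htj'⟩ :=
          (isB_append (s.take i) (s[i]) j' (by rw [hlen]; omega)).mp hbj
        have hsj' : s[j']? = s[i]? := by
          have h5 : (s.take i)[j']? = s[j']? := by
            simp [List.getElem?_take, show j' < i by omega]
          rw [← h5, htj', hsi]
        have hj'k : j' ≤ k := hmax j' (by rw [hlen]; omega) hbj'
        have := r4 j' (by omega) hbj' hsj' hj'k
        omega
  · rw [if_neg hc]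
    have hr0 : r = 0 := by
      rcases r3 with h0 | hEq
      · exact h0
      · exact absurd hEq.symm hc
    refine ⟨by rw [hr0]; exact isB_zero _, by rw [hlen1, hr0]; omega, ?_⟩
    intro j hj hbj
    rw [hlen1] at hj
    cases j with
    | zero => omega
    | succ j' =>
      exfalso
      rw [hstake] at hbj
      obtain ⟨hbj', htj'⟩ :=
        (isB_append (s.take i) (s[i]) j' (by rw [hlen]; omega)).mp hbj
      have hsj' : s[j']? = s[i]? := by
        have h5 : (s.take i)[j']? = s[j']? := by
          simp [List.getElem?_take, show j' < i by omega]
        rw [← h5, htj', hsi]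
      have hj'k : j' ≤ k := hmax j' (by rw [hlen]; omega) hbj'
      have hle := r4 j' (by omega) hbj' hsj' hj'k
      have hj'0 : j' = 0 := by omega
      apply hc
      rw [hr0]
      exact (hj'0 ▸ hsj').symm

-- the body of the for loop of Source B, named so the invariant can talk about it
def pvStep (s : List (Option String)) (st : List Nat × Nat) (i : Nat) : List Nat × Nat :=
  let k0 := pvKmpWhile s st.1 s[i]? st.2 st.2
  let k1 := if s[i]? = s[k0]? then k0 + 1 else k0
  (st.1 ++ [k1], k1)

theorem kmpFold_aux (s : List (Option String)) (h : 1 ≤ s.length) :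
    ∀ m, m + 1 ≤ s.length →
      ((List.range' 1 m).foldl (pvStep s) ([0], 0)).1.length = m + 1 ∧
      (∀ j, j < m + 1 →
        IsMaxB (s.take (j + 1)) (((List.range' 1 m).foldl (pvStep s) ([0], 0)).1.getD j 0)) ∧
      ((List.range' 1 m).foldl (pvStep s) ([0], 0)).2 =
        ((List.range' 1 m).foldl (pvStep s) ([0], 0)).1.getD m 0 := by
  intro m
  induction m with
  | zero =>
    intro _
    refine ⟨rfl, ?_, rfl⟩
    intro j hj
    obtain rfl : j = 0 := by omega
    show IsMaxB (s.take (0 + 1)) 0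
    have hl1 : (s.take 1).length = 1 := by simp; omega
    exact ⟨isB_zero _, by rw [hl1]; omega, fun j2 hj2 _ => by rw [hl1] at hj2; omega⟩
  | succ m ih =>
    intro hm
    obtain ⟨l1, l2, l3⟩ := ih (by omega)
    have hr : List.range' 1 (m + 1) = List.range' 1 m ++ [1 + m] := by rw [List.range'_concat]; norm_num
    have h1m : 1 + m = m + 1 := by omega
    rw [hr, h1m, List.foldl_append, List.foldl_cons, List.foldl_nil]
    set st0 := (List.range' 1 m).foldl (pvStep s) ([0], 0) with hst0
    have hmk : IsMaxB (s.take (m + 1)) st0.2 := by rw [l3]; exact l2 m (by omega)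
    have hstep := kmpStep_spec s st0.1 (m + 1) st0.2 (by omega) (by omega) l1
      (fun mm hmm => l2 mm (by omega)) hmk
    show (pvStep s st0 (m + 1)).1.length = m + 1 + 1 ∧ _ ∧ _
    unfold pvStep
    simp only
    refine ⟨by simp [l1], ?_, ?_⟩
    · intro j hj
      by_cases hjm : j < m + 1
      · rw [List.getD_append _ _ _ _ (by omega)]
        exact l2 j hjm
      · obtain rfl : j = m + 1 := by omega
        rw [List.getD_append_right _ _ _ _ (by omega), l1]
        simpa using hstep
    · rw [List.getD_append_right _ _ _ _ (by omega), l1]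
      simp

theorem kmpFold_max (s : List (Option String)) (h : 1 ≤ s.length) :
    IsMaxB s (pvKmpFold s) := by
  have hfold : pvKmpFold s = ((List.range' 1 (s.length - 1)).foldl (pvStep s) ([0], 0)).2 := rfl
  obtain ⟨l1, l2, l3⟩ := kmpFold_aux s h (s.length - 1) (by omega)
  rw [hfold, l3]
  have hmb := l2 (s.length - 1) (by omega)
  have hts : s.take ((s.length - 1) + 1) = s := by
    rw [show s.length - 1 + 1 = s.length by omega]
    exact List.take_length
  rwa [hts] at hmb

-- index facts for s = sc.map some ++ [none] ++ sp.map some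
theorem sIdx_lt (sc sp : List String) (j : Nat) (hj : j < sc.length) :
    (sc.map some ++ [none] ++ sp.map some)[j]? = (sc[j]?).map some := by
  rw [List.getElem?_append_left (by simp; omega), List.getElem?_append_left (by simpa using hj)]
  simp

theorem sIdx_mid (sc sp : List String) :
    (sc.map some ++ [none] ++ sp.map some)[sc.length]? = some none := by
  rw [List.getElem?_append_left (by simp), List.getElem?_append_right (by simp)]
  simp

theorem sIdx_gt (sc sp : List String) (j : Nat) (hj : sc.length < j) :
    (sc.map some ++ [none] ++ sp.map some)[j]? = (sp[j - sc.length - 1]?).map some := by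
  rw [List.getElem?_append_right (by simp; omega), List.getElem?_map]
  have : j - (List.map (some (α := String)) sc ++ [none]).length = j - sc.length - 1 := by
    simp; omega
  rw [this]

theorem sIdx_none (sc sp : List String) (j : Nat)
    (h : (sc.map some ++ [none] ++ sp.map some)[j]? = some none) : j = sc.length := by
  rcases Nat.lt_trichotomy j sc.length with hlt | heq | hgt
  · rw [sIdx_lt sc sp j hlt] at h
    rcases hx : sc[j]? with _ | x
    · rw [hx] at h; simp at h
    · rw [hx] at h; simp at h
  · exact heq
  · rw [sIdx_gt sc sp j hgt] at h
    rcases hx : sp[j - sc.length - 1]? with _ | x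
    · rw [hx] at h; simp at h
    · rw [hx] at h; simp at h

-- borders of the combined word are exactly the overlaps
theorem border_iff_match (sc sp : List String) (k : Nat)
    (hk : k < (sc.map some ++ [none] ++ sp.map some).length) :
    IsB (sc.map some ++ [none] ++ sp.map some) k ↔
      k ≤ sc.length ∧ k ≤ sp.length ∧ sp.drop (sp.length - k) = sc.take k := by
  set s := sc.map some ++ [none] ++ sp.map some with hs
  have hL : s.length = sc.length + 1 + sp.length := by simp [hs]; omega
  rw [isB_pointwise s k (by omega)]
  constructor
  · intro h
    have hkc : k ≤ sc.length := by
      by_contra hkc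
      push_neg at hkc
      have h1 := h sc.length (by omega)
      rw [sIdx_mid] at h1
      have := sIdx_none sc sp _ h1.symm
      omega
    have hkp : k ≤ sp.length := by
      by_contra hkp
      push_neg at hkp
      have h1 := h (k - sp.length - 1) (by omega)
      have he : s.length - k + (k - sp.length - 1) = sc.length := by omega
      rw [he, sIdx_mid] at h1
      have := sIdx_none sc sp _ h1
      omega
    refine ⟨hkc, hkp, ?_⟩
    apply List.ext_getElem?
    intro j
    by_cases hj : j < k
    · have h1 := h j hj
      rw [sIdx_lt sc sp j (by omega), sIdx_gt sc sp _ (by omega)] at h1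
      have he : s.length - k + j - sc.length - 1 = sp.length - k + j := by omega
      rw [he] at h1
      have h2 : sc[j]? = sp[sp.length - k + j]? :=
        Option.map_injective (Option.some_injective _) h1
      have hts : (sc.take k)[j]? = sc[j]? := by simp [List.getElem?_take, hj]
      rw [List.getElem?_drop, hts]
      exact h2.symm
    · rw [List.getElem?_eq_none (by simp; omega), List.getElem?_eq_none (by simp; omega)]
  · rintro ⟨hkc, hkp, hm⟩
    intro j hj
    rw [sIdx_lt sc sp j (by omega), sIdx_gt sc sp _ (by omega)]
    have he : s.length - k + j - sc.length - 1 = sp.length - k + j := by omega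
    rw [he]
    have h2 := congrArg (fun l => l[j]?) hm
    simp only [List.getElem?_drop, List.getElem?_take] at h2
    congr 1
    simpa [hj] using h2.symm

-- A's descending scan returns the largest matching size ≤ m (0 if none)
theorem aScan_spec (sp sc : List String) (m : Nat) :
    pvAScan sp sc m ≤ m ∧
    (pvAScan sp sc m = 0 ∨
      (1 ≤ pvAScan sp sc m ∧
        sp.drop (sp.length - pvAScan sp sc m) = sc.take (pvAScan sp sc m))) ∧
    (∀ j, 1 ≤ j → j ≤ m → sp.drop (sp.length - j) = sc.take j → j ≤ pvAScan sp sc m) := by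
  induction m with
  | zero =>
    refine ⟨le_rfl, Or.inl rfl, ?_⟩
    intro j h1 h2 _
    omega
  | succ m ih =>
    by_cases hC : PySem.List.slice sp (some (-((m + 1 : Nat) : Int))) none
        = PySem.List.slice sc none (some ((m + 1 : Nat) : Int))
    · have hred : pvAScan sp sc (m + 1) = m + 1 := by
        simp only [pvAScan, if_pos hC]
      rw [hred]
      rw [PySem.List.slice_from_neg_natCast _ _ (by omega), PySem.List.slice_to_natCast] at hC
      exact ⟨le_rfl, Or.inr ⟨by omega, hC⟩, fun j h1 h2 _ => by omega⟩
    · have hred : pvAScan sp sc (m + 1) = pvAScan sp sc m := by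
        simp only [pvAScan, if_neg hC]
      rw [hred]
      obtain ⟨i1, i2, i3⟩ := ih
      refine ⟨by omega, i2, ?_⟩
      intro j h1 h2 hQ
      rcases Nat.lt_or_ge j (m + 1) with hj | hj
      · exact i3 j h1 (by omega) hQ
      · exfalso
        obtain rfl : j = m + 1 := by omega
        apply hC
        rw [PySem.List.slice_from_neg_natCast _ _ (by omega), PySem.List.slice_to_natCast]
        exact hQ

-- ===== VERDICT (by name: the statement is the Claim_ definition above) =====
theorem diff_world_boss_recent_logs_py_spec : Claim_equal_diff_world_boss_recent_logs_py := by
  intro previous_logs current_logs _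
  unfold Spec_diff_world_boss_recent_logs_py
  unfold diff_world_boss_recent_logs_py diff_world_boss_recent_logs_py_alt
  set sp := pvSafe previous_logs with hsp'
  set sc := pvSafe current_logs with hsc'
  by_cases hsc : sc = []
  · simp [hsc]
  by_cases hsp : sp = []
  · simp [hsc, hsp]
  simp only [if_neg hsc, if_neg hsp]
  rw [PySem.List.slice_from_natCast]
  have key : pvAScan sp sc (min sp.length sc.length)
      = pvKmpFold (sc.map some ++ [none] ++ sp.map some) := by
    set s := sc.map some ++ [none] ++ sp.map some with hs
    have hL : s.length = sc.length + 1 + sp.length := by simp [hs]; omega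
    obtain ⟨hbB, hltB, hmaxB⟩ := kmpFold_max s (by omega)
    obtain ⟨hkc, hkp, hQB⟩ := (border_iff_match sc sp (pvKmpFold s) hltB).mp hbB
    obtain ⟨a1, a2, a3⟩ := aScan_spec sp sc (min sp.length sc.length)
    have hm1 : min sp.length sc.length ≤ sp.length := Nat.min_le_left _ _
    have hm2 : min sp.length sc.length ≤ sc.length := Nat.min_le_right _ _
    have hm3 : pvKmpFold s ≤ min sp.length sc.length := le_min hkp hkc
    have h1 : pvKmpFold s ≤ pvAScan sp sc (min sp.length sc.length) := by
      rcases Nat.eq_zero_or_pos (pvKmpFold s) with h | h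
      · omega
      · exact a3 (pvKmpFold s) h hm3 hQB
    have h2 : pvAScan sp sc (min sp.length sc.length) ≤ pvKmpFold s := by
      rcases a2 with h0 | ⟨hr1, hQr⟩
      · omega
      · have hb : IsB s (pvAScan sp sc (min sp.length sc.length)) :=
          (border_iff_match sc sp _ (by rw [← hs]; omega)).mpr ⟨by omega, by omega, hQr⟩
        exact hmaxB _ (by omega) hb
    omega
  rw [key]
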